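-- pv_equiv track=rewrite | github.com/rhamenator/ai-scraping-defense | scripts/create_issues_from_alerts.py | group_secret_scanning_alerts
-- ===== SOURCE A (Python) =====
-- from collections import defaultdict
-- from typing import Dict, List, Optional
--
-- def group_secret_scanning_alerts(alerts: List[Dict]) -> Dict[str, List[Dict]]:
--     """Group secret scanning alerts by secret type."""
--     grouped = defaultdict(list)
--
--     for alert in alerts:
--         secret_type = alert.get("secret_type", "unknown")
--         secret_type_display = alert.get("secret_type_display_name", secret_type)
--
--         # Create a key for grouping
--         key = f"{secret_type}:{secret_type_display}"
--         grouped[key].append(alert)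
--
--     return dict(grouped)
-- ===== SOURCE B (Python) =====
-- def group_secret_scanning_alerts(alerts):
--     """Group secret scanning alerts by secret type."""
--     def key_of(alert):
--         secret_type = alert.get("secret_type", "unknown")
--         return f"{secret_type}:{alert.get('secret_type_display_name', secret_type)}"
--
--     keys = [key_of(a) for a in alerts]
--     return {k: [a for a, ka in zip(alerts, keys) if ka == k]
--             for k in dict.fromkeys(keys)}
-- ===== Notes on version B (the rewrite author's own statement) =====
-- stated objective: alternative
-- what changed: Replaces the single-pass defaultdict bucketing with a two-pass scheme: precompute each alert's key, deduplicate the keys in first-seen order, and build each group by filtering the alert list, so no mutable dict accumulator is needed.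
import Mathlib
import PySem

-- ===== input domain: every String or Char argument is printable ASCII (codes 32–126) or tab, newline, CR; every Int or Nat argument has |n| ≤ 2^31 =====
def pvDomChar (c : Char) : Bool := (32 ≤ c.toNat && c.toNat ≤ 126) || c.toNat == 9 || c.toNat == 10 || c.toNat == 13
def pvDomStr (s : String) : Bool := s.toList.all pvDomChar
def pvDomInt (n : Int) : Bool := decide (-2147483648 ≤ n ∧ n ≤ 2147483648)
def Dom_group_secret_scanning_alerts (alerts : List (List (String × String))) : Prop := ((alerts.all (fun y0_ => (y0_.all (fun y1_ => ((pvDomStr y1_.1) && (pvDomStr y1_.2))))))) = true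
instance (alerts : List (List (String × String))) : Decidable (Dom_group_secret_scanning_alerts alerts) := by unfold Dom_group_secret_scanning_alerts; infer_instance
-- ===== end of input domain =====

-- B replaces A's single-pass defaultdict bucketing by a two-pass grouping (dedup the keys,
-- then one filter pass per distinct key); same return value, no speed claim.

-- ===== PORT A =====
-- shared key helper: both Pythons compute the same f"{secret_type}:{secret_type_display}"
-- with identical .get defaults (alert.get = first-match lookup on the association list)
def pvKey (alert : List (String × String)) : String :=
  let secret_type := (PySem.Dict.mk alert).getD "secret_type" "unknown"
  let secret_type_display := (PySem.Dict.mk alert).getD "secret_type_display_name" secret_type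
  secret_type ++ ":" ++ secret_type_display

def group_secret_scanning_alerts (alerts : List (List (String × String))) : List (String × List (List (String × String))) :=
  -- grouped = defaultdict(list); for alert in alerts: grouped[key].append(alert); return dict(grouped)
  (alerts.foldl (fun grouped alert => grouped.modify (pvKey alert) [] (fun l => l ++ [alert]))
     PySem.Dict.empty).items

-- ===== PORT B =====
def group_secret_scanning_alerts_alt (alerts : List (List (String × String))) : List (String × List (List (String × String))) :=
  let keys := alerts.map pvKey
  (PySem.List.dedup keys).map (fun k =>
    (k, ((alerts.zip keys).filter (fun p => p.2 == k)).map (fun p => p.1)))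

-- ===== PRECONDITION & SPEC =====
def Spec_group_secret_scanning_alerts (alerts : List (List (String × String))) (out : List (String × List (List (String × String)))) : Prop := out = group_secret_scanning_alerts_alt alerts
instance (alerts : List (List (String × String))) (out : List (String × List (List (String × String)))) : Decidable (Spec_group_secret_scanning_alerts alerts out) := by unfold Spec_group_secret_scanning_alerts; infer_instance

-- ===== CLAIM (what is proved, stated in full; the proofs are below) =====
def Claim_equal_group_secret_scanning_alerts : Prop := ∀ (alerts : List (List (String × String))), Dom_group_secret_scanning_alerts alerts → Spec_group_secret_scanning_alerts alerts (group_secret_scanning_alerts alerts)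

-- ===== LEMMAS AND PROOFS =====

-- B's zip-with-keys filter is a plain filter of the alerts by their key
theorem pv_zip_filter (alerts : List (List (String × String))) (k : String) :
    ((alerts.zip (alerts.map pvKey)).filter (fun p => p.2 == k)).map (fun p => p.1)
      = alerts.filter (fun a => pvKey a == k) := by
  induction alerts with
  | nil => rfl
  | cons a t ih =>
    simp only [List.map_cons, List.zip_cons_cons, List.filter_cons]
    by_cases h : pvKey a == k <;> simp [h, ih]

-- the dict A's loop builds: keys are the deduped key list, values are filters
theorem pv_fold_dict (alerts : List (List (String × String))) :
    alerts.foldl (fun grouped alert => grouped.modify (pvKey alert) [] (fun l => l ++ [alert]))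
        PySem.Dict.empty
      = (alerts.map (fun a => (pvKey a, a))).foldl
          (fun grouped p => grouped.modify p.1 [] (fun l => l ++ [p.2])) PySem.Dict.empty := by
  rw [List.foldl_map]

theorem group_equal (alerts : List (List (String × String))) :
    group_secret_scanning_alerts alerts = group_secret_scanning_alerts_alt alerts := by
  unfold group_secret_scanning_alerts group_secret_scanning_alerts_alt
  have hnd : (alerts.foldl (fun grouped alert => grouped.modify (pvKey alert) [] (fun l => l ++ [alert]))
      PySem.Dict.empty).keys.Nodup :=
    PySem.Dict.nodup_keys_foldl_modify_key alerts pvKey [] (fun _ a => (fun l => l ++ [a]))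
      PySem.Dict.empty PySem.Dict.nodup_keys_empty
  rw [PySem.Dict.items_eq_map_keys _ hnd []]
  rw [PySem.Dict.keys_foldl_modify_key]
  simp only [PySem.Dict.keys_empty, PySem.Set.update_nil_left, ← PySem.List.dedup_eq_ofList]
  apply List.map_congr_left
  intro k _
  rw [pv_zip_filter, pv_fold_dict, PySem.Dict.getD_foldl_modify_append]
  simp [List.filter_map, List.map_map, Function.comp_def]

-- ===== VERDICT (by name: the statement is the Claim_ definition above) =====
theorem group_secret_scanning_alerts_spec : Claim_equal_group_secret_scanning_alerts := by
  intro alerts _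
  exact group_equal alerts
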